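-- pv_equiv track=rewrite | github.com/broadinstitute/annmas | src/longbow/inspect/command.py | format_state_sequence
-- ===== SOURCE A (Python) =====
-- def format_state_sequence(seq, path, line_length=150):
--     # TODO: Must tie this into the model itself.  We shouldn't re-define our segments here.
--     color_hash = {
--         "10x_Adapter": "#334D5C",
--         "5p_TSO": "#334D5C",
--         "Poly_A": "#45B29D",
--         "3p_Adapter": "#EFC94C",
--         "A": "#DF5A49",
--         "B": "#DF5A49",
--         "C": "#DF5A49",
--         "D": "#DF5A49",
--         "E": "#DF5A49",
--         "F": "#DF5A49",
--         "G": "#DF5A49",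
--         "H": "#DF5A49",
--         "I": "#DF5A49",
--         "J": "#DF5A49",
--         "K": "#DF5A49",
--         "L": "#DF5A49",
--         "M": "#DF5A49",
--         "N": "#DF5A49",
--         "O": "#DF5A49",
--         "P": "#DF5A49",
--         "Q": "#DF5A49",
--         "R": "#DF5A49",
--         "random": "#aaaaaa",
--     }
--
--     labelled_bases = []
--     state_labels = []
--     state_colors = []
--
--     for i in range(0, len(path), line_length):
--         bases = []
--         label = path[i]
--
--         for j in range(i, min(i + line_length, len(path))):
--             a = seq[j]
--             b = path[j]
--
--             # Handle the line breaks: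
--             if label == b:
--                 bases.append(a)
--             elif label != b:
--                 labelled_bases.append("".join(bases))
--                 state_labels.append(label)
--                 state_colors.append(color_hash[label])
--
--                 bases = [a]
--                 label = b
--
--         labelled_bases.append("".join(bases))
--         state_labels.append(label)
--         state_colors.append(color_hash[label])
--
--     return labelled_bases, state_colors, state_labels
-- ===== SOURCE B (Python) =====
-- def _runs(labels, bases):
--     """Split a line into (bases, label) runs of consecutive equal labels."""
--     if not labels:
--         return []
--     k = 1
--     while k < len(labels) and labels[k] == labels[0]:
--         k += 1
--     return [(bases[:k], labels[0])] + _runs(labels[k:], bases[k:])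
--
--
-- def format_state_sequence(seq, path, line_length=150):
--     # Slice each line out of path/seq, split it into label runs, then emit the runs.
--     color_hash = {
--         "10x_Adapter": "#334D5C",
--         "5p_TSO": "#334D5C",
--         "Poly_A": "#45B29D",
--         "3p_Adapter": "#EFC94C",
--         "A": "#DF5A49",
--         "B": "#DF5A49",
--         "C": "#DF5A49",
--         "D": "#DF5A49",
--         "E": "#DF5A49",
--         "F": "#DF5A49",
--         "G": "#DF5A49",
--         "H": "#DF5A49",
--         "I": "#DF5A49",
--         "J": "#DF5A49",
--         "K": "#DF5A49",
--         "L": "#DF5A49",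
--         "M": "#DF5A49",
--         "N": "#DF5A49",
--         "O": "#DF5A49",
--         "P": "#DF5A49",
--         "Q": "#DF5A49",
--         "R": "#DF5A49",
--         "random": "#aaaaaa",
--     }
--
--     labelled_bases = []
--     state_labels = []
--     state_colors = []
--
--     for i in range(0, len(path), line_length):
--         labels = path[i:i + line_length]
--         bases = seq[i:i + len(labels)]
--         for text, label in _runs(labels, bases):
--             labelled_bases.append(text)
--             state_labels.append(label)
--             state_colors.append(color_hash[label])
--
--     return labelled_bases, state_colors, state_labels
-- ===== Notes on version B (the rewrite author's own statement) =====
-- stated objective: alternative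
-- what changed: Replaces A's stateful inner loop (carrying a run accumulator and current label with explicit flush logic across per-index branches) by slicing each line out of path/seq and splitting the slice into runs of consecutive equal labels with a recursive two-pointer helper, then emitting the prepared (text, label) runs.
import Mathlib
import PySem

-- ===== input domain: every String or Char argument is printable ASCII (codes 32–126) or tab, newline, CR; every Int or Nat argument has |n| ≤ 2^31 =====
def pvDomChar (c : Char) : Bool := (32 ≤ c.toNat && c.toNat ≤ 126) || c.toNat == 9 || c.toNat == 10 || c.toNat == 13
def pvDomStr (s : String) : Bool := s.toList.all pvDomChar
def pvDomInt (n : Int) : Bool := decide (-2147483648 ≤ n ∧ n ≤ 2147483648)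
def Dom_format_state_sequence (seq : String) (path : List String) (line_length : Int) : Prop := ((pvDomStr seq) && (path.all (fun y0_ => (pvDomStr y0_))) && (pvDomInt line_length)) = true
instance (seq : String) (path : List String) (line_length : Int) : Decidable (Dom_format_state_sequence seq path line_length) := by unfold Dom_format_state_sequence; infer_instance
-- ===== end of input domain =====

-- B replaces A's stateful run/label accumulator loop by slicing each line out of path/seq and
-- splitting the slice into runs of consecutive equal labels (objective: alternative decomposition, same cost).

-- ===== PORT A =====

-- the module-level colour dictionary both versions define literally
def fsqColorHash : PySem.Dict String String := PySem.Dict.ofList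
  [("10x_Adapter", "#334D5C"), ("5p_TSO", "#334D5C"), ("Poly_A", "#45B29D"),
   ("3p_Adapter", "#EFC94C"), ("A", "#DF5A49"), ("B", "#DF5A49"), ("C", "#DF5A49"),
   ("D", "#DF5A49"), ("E", "#DF5A49"), ("F", "#DF5A49"), ("G", "#DF5A49"),
   ("H", "#DF5A49"), ("I", "#DF5A49"), ("J", "#DF5A49"), ("K", "#DF5A49"),
   ("L", "#DF5A49"), ("M", "#DF5A49"), ("N", "#DF5A49"), ("O", "#DF5A49"),
   ("P", "#DF5A49"), ("Q", "#DF5A49"), ("R", "#DF5A49"), ("random", "#aaaaaa")]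

-- the three appends 'labelled_bases.append("".join(bases)); state_labels.append(label);
-- state_colors.append(color_hash[label])' (color_hash[label] via getD; Pre_ keeps the key present)
def fsqFlush (acc : List String × List String × List String) (bases : List Char) (label : String) :
    List String × List String × List String :=
  (acc.1 ++ [String.ofList bases], acc.2.1 ++ [label], acc.2.2 ++ [PySem.Dict.getD fsqColorHash label ""])

-- A's inner-loop body; state = (three output lists, bases, label); seq[j]/path[j] via pyGetD
-- (Pre_ keeps every accessed index in range)
def fsqStepA (s : List Char) (path : List String)
    (st : (List String × List String × List String) × List Char × String) (j : Int) :
    (List String × List String × List String) × List Char × String :=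
  let a := PySem.List.pyGetD s j ' '
  let b := PySem.List.pyGetD path j ""
  if st.2.2 = b then (st.1, st.2.1 ++ [a], st.2.2)
  else (fsqFlush st.1 st.2.1 st.2.2, [a], b)

-- A's outer-loop body: one line 'for j in range(i, min(i + line_length, len(path)))' + final flush
def fsqChunkA (s : List Char) (path : List String) (line_length : Int)
    (acc : List String × List String × List String) (i : Int) :
    List String × List String × List String :=
  let label0 := PySem.List.pyGetD path i ""
  let st := (PySem.List.pyRange i (min (i + line_length) (path.length : Int)) 1).foldl
    (fsqStepA s path) (acc, ([] : List Char), label0)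
  fsqFlush st.1 st.2.1 st.2.2

def format_state_sequence (seq : String) (path : List String) (line_length : Int) :
    List String × List String × List String :=
  let s := seq.toList
  let acc := (PySem.List.pyRange 0 (path.length : Int) line_length).foldl
    (fsqChunkA s path line_length) (([] : List String), ([] : List String), ([] : List String))
  (acc.1, acc.2.2, acc.2.1)

-- ===== PORT B =====

-- B: the 'while k < len(labels) and labels[k] == labels[0]: k += 1' scan (k = fsqRunLen + 1)
def fsqRunLen (l0 : String) (ls : List String) : Nat :=
  match ls with
  | [] => 0
  | x :: xs => if x = l0 then fsqRunLen l0 xs + 1 else 0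

-- B's helper _runs(labels, bases)
def fsqRuns (labels : List String) (bases : List Char) : List (String × String) :=
  match labels with
  | [] => []
  | l0 :: rest =>
    let k := fsqRunLen l0 rest + 1
    (String.ofList (bases.take k), l0) :: fsqRuns (rest.drop (k - 1)) (bases.drop k)
termination_by labels.length
decreasing_by simp

def fsqAppendRun (acc : List String × List String × List String) (r : String × String) :
    List String × List String × List String :=
  (acc.1 ++ [r.1], acc.2.1 ++ [r.2], acc.2.2 ++ [PySem.Dict.getD fsqColorHash r.2 ""])

def fsqChunkB (s : List Char) (path : List String) (line_length : Int)
    (acc : List String × List String × List String) (i : Int) :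
    List String × List String × List String :=
  let labels := PySem.List.slice path (some i) (some (i + line_length))
  let bases := PySem.List.slice s (some i) (some (i + (labels.length : Int)))
  (fsqRuns labels bases).foldl fsqAppendRun acc

def format_state_sequence_alt (seq : String) (path : List String) (line_length : Int) :
    List String × List String × List String :=
  let s := seq.toList
  let acc := (PySem.List.pyRange 0 (path.length : Int) line_length).foldl
    (fsqChunkB s path line_length) (([] : List String), ([] : List String), ([] : List String))
  (acc.1, acc.2.2, acc.2.1)


-- ===== PRECONDITION & SPEC =====

-- Pre_ excludes exactly the inputs on which A raises: line_length = 0 (ValueError from range),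
-- and — only reached when line_length ≥ 1, since a negative step makes A's loop empty — a path
-- label missing from color_hash (KeyError) or seq shorter than path (IndexError).
def Pre_format_state_sequence (seq : String) (path : List String) (line_length : Int) : Prop :=
  line_length ≠ 0 ∧ (1 ≤ line_length →
    (path.length ≤ seq.toList.length ∧ ∀ l ∈ path, (PySem.Dict.get? fsqColorHash l).isSome))
instance (seq : String) (path : List String) (line_length : Int) :
    Decidable (Pre_format_state_sequence seq path line_length) := by
  unfold Pre_format_state_sequence; infer_instance

def pvWitness_format_state_sequence : String × List String × Int := ("ACG", ["A", "A", "B"], 2)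

def Spec_format_state_sequence (seq : String) (path : List String) (line_length : Int)
    (out : List String × List String × List String) : Prop :=
  out = format_state_sequence_alt seq path line_length
instance (seq : String) (path : List String) (line_length : Int)
    (out : List String × List String × List String) :
    Decidable (Spec_format_state_sequence seq path line_length out) := by
  unfold Spec_format_state_sequence; infer_instance

-- ===== CLAIM (what is proved, stated in full; the proofs are below) =====
def Claim_equal_format_state_sequence : Prop := ∀ (seq : String) (path : List String) (line_length : Int), Dom_format_state_sequence seq path line_length → Pre_format_state_sequence seq path line_length → Spec_format_state_sequence seq path line_length (format_state_sequence seq path line_length)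

-- ===== LEMMAS AND PROOFS =====


def fsqFlushSt (st : (List String × List String × List String) × List Char × String) :
    List String × List String × List String :=
  fsqFlush st.1 st.2.1 st.2.2

-- A's per-index step, re-expressed on the (char, label) pair it reads
def fsqPairStep (st : (List String × List String × List String) × List Char × String)
    (p : Char × String) : (List String × List String × List String) × List Char × String :=
  if st.2.2 = p.2 then (st.1, st.2.1 ++ [p.1], st.2.2)
  else (fsqFlush st.1 st.2.1 st.2.2, [p.1], p.2)

-- A's index loop over [i, i+|L|) is a fold over the zipped slices
theorem fsq_idx_to_zip (s : List Char) (path : List String) :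
    ∀ (L : List String) (Bs : List Char) (i : Int)
      (st : (List String × List String × List String) × List Char × String),
      0 ≤ i → Bs.length = L.length →
      (∀ r : Nat, r < L.length →
        PySem.List.pyGetD s (i + r) ' ' = Bs.getD r ' ' ∧
        PySem.List.pyGetD path (i + r) "" = L.getD r "") →
      (PySem.List.pyRange i (i + (L.length : Int)) 1).foldl (fsqStepA s path) st
        = (Bs.zip L).foldl fsqPairStep st := by
  intro L
  induction L with
  | nil =>
    intro Bs i st _ hlen _
    simp only [List.length_nil] at hlen
    rw [List.length_eq_zero_iff] at hlen
    subst hlen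
    simp
  | cons l Lt ih =>
    intro Bs i st h0 hlen hget
    cases Bs with
    | nil => simp at hlen
    | cons c Bt =>
      simp only [List.length_cons] at hlen
      have hcons : PySem.List.pyRange i (i + ((Lt.length + 1 : Nat) : Int)) 1
          = i :: PySem.List.pyRange (i+1) (i + ((Lt.length + 1 : Nat) : Int)) 1 :=
        PySem.List.pyRange_one_cons (by push_cast; omega)
      rw [List.length_cons, hcons]
      simp only [List.zip_cons_cons, List.foldl_cons]
      have h00 := hget 0 (by simp)
      simp only [Nat.cast_zero, add_zero, List.getD_cons_zero] at h00
      have hstep : fsqStepA s path st i = fsqPairStep st (c, l) := by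
        simp only [fsqStepA, fsqPairStep, h00.1, h00.2]
      rw [hstep]
      have harith : i + ((Lt.length + 1 : Nat) : Int) = (i + 1) + (Lt.length : Int) := by
        push_cast; ring
      rw [harith]
      apply ih Bt (i+1) _ (by omega) (by omega)
      intro r hr
      have := hget (r+1) (by simp; omega)
      simpa [add_assoc, add_comm 1 (r:Int)] using this

theorem fsq_runs_cons (l0 : String) (rest : List String) (bases : List Char) :
    fsqRuns (l0 :: rest) bases
      = (String.ofList (bases.take (fsqRunLen l0 rest + 1)), l0)
        :: fsqRuns (rest.drop (fsqRunLen l0 rest)) (bases.drop (fsqRunLen l0 rest + 1)) := by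
  rw [fsqRuns]
  simp

-- flushing after A's pair loop emits exactly the runs: the open run (run ++ leading equal
-- labels), then fsqRuns of the remainder
theorem fsq_aux (L : List String) :
    ∀ (Bs : List Char) (acc : List String × List String × List String)
      (run : List Char) (l0 : String), Bs.length = L.length →
      fsqFlushSt ((Bs.zip L).foldl fsqPairStep (acc, run, l0))
        = ((String.ofList (run ++ Bs.take (fsqRunLen l0 L)), l0)
            :: fsqRuns (L.drop (fsqRunLen l0 L)) (Bs.drop (fsqRunLen l0 L))).foldl
            fsqAppendRun acc := by
  induction L with
  | nil =>
    intro Bs acc run l0 hlen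
    simp only [List.length_nil] at hlen
    rw [List.length_eq_zero_iff] at hlen
    subst hlen
    simp [fsqRuns, fsqRunLen, fsqFlushSt, fsqFlush, fsqAppendRun]
  | cons l Lt ih =>
    intro Bs acc run l0 hlen
    cases Bs with
    | nil => simp at hlen
    | cons c Bt =>
      simp only [List.length_cons] at hlen
      simp only [List.zip_cons_cons, List.foldl_cons]
      by_cases hl : l = l0
      · subst hl
        have hstep : fsqPairStep (acc, run, l) (c, l) = (acc, run ++ [c], l) := by
          simp [fsqPairStep]
        rw [hstep, ih Bt acc (run ++ [c]) l (by omega)]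
        have hrl : fsqRunLen l (l :: Lt) = fsqRunLen l Lt + 1 := by simp [fsqRunLen]
        rw [hrl]
        simp [List.append_assoc]
      · have hstep : fsqPairStep (acc, run, l0) (c, l)
            = (fsqFlush acc run l0, [c], l) := by
          simp [fsqPairStep, Ne.symm hl]
        rw [hstep, ih Bt (fsqFlush acc run l0) [c] l (by omega)]
        have hrl : fsqRunLen l0 (l :: Lt) = 0 := by simp [fsqRunLen, hl]
        rw [hrl]
        simp only [List.take_zero, List.drop_zero, List.append_nil, List.foldl_cons]
        rw [fsq_runs_cons]
        simp only [List.foldl_cons, List.take_succ_cons, List.drop_succ_cons]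
        have : fsqAppendRun acc (String.ofList run, l0) = fsqFlush acc run l0 := by
          simp [fsqAppendRun, fsqFlush]
        rw [this]
        simp

-- one line of A (stateful loop + flush) = one line of B (slice and split into runs)
theorem fsq_chunk_eq (s : List Char) (path : List String) (ll : Int) (hll : 1 ≤ ll)
    (hsl : path.length ≤ s.length)
    (acc : List String × List String × List String) (i : Int)
    (h0 : 0 ≤ i) (hin : i < (path.length : Int)) :
    fsqChunkA s path ll acc i = fsqChunkB s path ll acc i := by
  have hb0 : (0:Int) ≤ i + ll := by omega
  simp only [fsqChunkA, fsqChunkB]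
  generalize hL : PySem.List.slice path (some i) (some (i + ll)) = labels
  generalize hB : PySem.List.slice s (some i) (some (i + (labels.length : Int))) = bases
  have hslice : labels = (path.drop i.toNat).take ((i+ll).toNat - i.toNat) := by
    rw [← hL, PySem.List.slice_toNat path h0 hb0]
  have hclen : labels.length = min ((i+ll).toNat - i.toNat) (path.length - i.toNat) := by
    rw [hslice]; simp
  set c := labels.length with hc
  have hcpos : 0 < c := by omega
  have hcle : i.toNat + c ≤ path.length := by omega
  have hbslice : bases = (s.drop i.toNat).take c := by
    rw [← hB, PySem.List.slice_toNat s h0 (by omega)]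
    congr 1
    omega
  have hblen : bases.length = c := by
    rw [hbslice]; simp; omega
  have hgetl : ∀ r : Nat, r < c → PySem.List.pyGetD path (i + r) "" = labels.getD r "" := by
    intro r hr
    have hir : (i + (r:Int)).toNat = i.toNat + r := by omega
    rw [PySem.List.pyGetD_eq_getElem path "" (by omega) (by omega)]
    simp only [hir]
    rw [List.getD_eq_getElem labels "" (by omega), List.getElem_of_eq hslice,
      List.getElem_take, List.getElem_drop]
  have hgetb : ∀ r : Nat, r < c → PySem.List.pyGetD s (i + r) ' ' = bases.getD r ' ' := by
    intro r hr
    have hir : (i + (r:Int)).toNat = i.toNat + r := by omega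
    rw [PySem.List.pyGetD_eq_getElem s ' ' (by omega) (by omega)]
    simp only [hir]
    rw [List.getD_eq_getElem bases ' ' (by omega), List.getElem_of_eq hbslice,
      List.getElem_take, List.getElem_drop]
  have hmin : min (i + ll) (path.length : Int) = i + (c:Int) := by omega
  rw [hmin]
  rw [fsq_idx_to_zip s path labels bases i _ h0 (by omega)
    (fun r hr => ⟨hgetb r (by omega), hgetl r (by omega)⟩)]
  obtain ⟨l0, rest, hLr⟩ : ∃ l0 rest, labels = l0 :: rest := by
    cases hl : labels with
    | nil => rw [hl] at hc; simp [hc] at hcpos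
    | cons x xs => exact ⟨x, xs, rfl⟩
  have hlab0 : PySem.List.pyGetD path i "" = l0 := by
    have := hgetl 0 hcpos
    simpa [hLr] using this
  rw [hlab0]
  have haux := fsq_aux labels bases acc [] l0 (by omega)
  rw [show (fsqFlush ((bases.zip labels).foldl fsqPairStep (acc, [], l0)).1
      ((bases.zip labels).foldl fsqPairStep (acc, [], l0)).2.1
      ((bases.zip labels).foldl fsqPairStep (acc, [], l0)).2.2)
    = fsqFlushSt ((bases.zip labels).foldl fsqPairStep (acc, [], l0)) from rfl, haux]
  rw [hLr, fsq_runs_cons]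
  have hK : fsqRunLen l0 (l0 :: rest) = fsqRunLen l0 rest + 1 := by simp [fsqRunLen]
  rw [hK]
  simp

-- the two ports agree: line by line for line_length ≥ 1, trivially (both loops empty) for
-- negative line_length
theorem fsq_main (seq : String) (path : List String) (ll : Int) (hll : ll ≠ 0)
    (hlen : 1 ≤ ll → path.length ≤ seq.toList.length) :
    format_state_sequence seq path ll = format_state_sequence_alt seq path ll := by
  simp only [format_state_sequence, format_state_sequence_alt]
  by_cases h1 : 1 ≤ ll
  · rw [PySem.List.foldl_congr_mem _ _ (fsqChunkB seq.toList path ll) _ ?_]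
    intro acc i hi
    rw [PySem.List.mem_pyRange_iff_of_pos (by omega : (0:Int) < ll)] at hi
    exact fsq_chunk_eq seq.toList path ll h1 (hlen h1) acc i hi.1 hi.2.1
  · rw [PySem.List.pyRange_of_neg 0 (path.length : Int) (by omega : ll < 0)]
    rw [if_neg (by omega : ¬ (path.length : Int) < 0)]
    simp

-- ===== VERDICT (by name: the statement is the Claim_ definition above) =====
theorem format_state_sequence_spec : Claim_equal_format_state_sequence := by
  intro seq path ll _hdom hpre
  unfold Spec_format_state_sequence
  exact fsq_main seq path ll hpre.1 (fun h => (hpre.2 h).1)
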